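-- pv_equiv track=rewrite | github.com/etymology/dune-monorepo | src/dune_winder/generate_plc_monoroutine.py | _collect_collision_names
-- ===== SOURCE A (Python) =====
-- from collections import defaultdict
--
-- def _collect_collision_names(program_payloads: dict[str, dict]) -> set[str]:
--   name_to_programs: dict[str, set[str]] = defaultdict(set)
--   for program_name, payload in program_payloads.items():
--     for tag in payload.get("program_tags", []):
--       name_to_programs[str(tag["name"])].add(program_name)
--   return {
--     name
--     for name, programs in name_to_programs.items()
--     if len(programs) > 1
--   }
-- ===== SOURCE B (Python) =====
-- def _collect_collision_names(program_payloads: dict[str, dict]) -> set[str]: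
--   tag_names = [
--     [str(tag["name"]) for tag in payload.get("program_tags", [])]
--     for payload in program_payloads.values()
--   ]
--   seen: list[str] = []
--   for names in tag_names:
--     for n in names:
--       if n not in seen:
--         seen.append(n)
--   return {
--     n for n in seen
--     if sum(1 for names in tag_names if n in names) > 1
--   }
-- ===== Notes on version B (the rewrite author's own statement) =====
-- stated objective: simpler
-- what changed: Replaces the growing name->set-of-programs dict plus final size-filter by a flat per-program name-list table: names are ordered-deduped once, and a name is a collision iff it occurs in more than one program's name list (a plain membership count), so no dict of sets is ever built.
import Mathlib
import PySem

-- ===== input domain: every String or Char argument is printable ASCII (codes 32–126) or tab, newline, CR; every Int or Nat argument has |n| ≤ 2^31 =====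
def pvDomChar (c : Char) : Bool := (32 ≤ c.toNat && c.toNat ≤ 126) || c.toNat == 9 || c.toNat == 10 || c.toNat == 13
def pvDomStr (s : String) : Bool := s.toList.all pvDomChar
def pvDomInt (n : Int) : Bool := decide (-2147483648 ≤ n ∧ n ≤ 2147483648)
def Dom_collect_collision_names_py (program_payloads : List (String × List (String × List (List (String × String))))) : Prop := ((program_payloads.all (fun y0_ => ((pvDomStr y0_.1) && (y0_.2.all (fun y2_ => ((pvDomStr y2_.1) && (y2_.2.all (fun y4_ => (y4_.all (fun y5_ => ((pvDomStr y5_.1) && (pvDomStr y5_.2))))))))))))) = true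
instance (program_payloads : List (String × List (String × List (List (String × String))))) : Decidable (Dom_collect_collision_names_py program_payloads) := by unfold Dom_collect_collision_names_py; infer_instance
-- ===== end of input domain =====

-- B replaces A's name->set-of-programs dict (plus a final size filter) by an ordered dedup of
-- all tag names and a per-name membership count over the per-program name lists (objective: simpler).

-- shared helpers mirroring the identical Python subexpression str(tag["name"]) /
-- [str(tag["name"]) for tag in payload.get("program_tags", [])] appearing in both programs
def pvTagName (tag : List (String × String)) : String :=
  ((PySem.Dict.ofList tag).get? "name").getD ""    -- tag["name"]; Pre_ guarantees the key exists (KeyError otherwise)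

def pvNamesOf (payload : List (String × List (List (String × String)))) : List String :=
  ((PySem.Dict.ofList payload).getD "program_tags" []).map pvTagName

-- ===== PORT A =====
def collect_collision_names_py (program_payloads : List (String × List (String × List (List (String × String))))) : List String :=
  let name_to_programs : PySem.Dict String (PySem.Set String) :=
    program_payloads.foldl (fun d pr =>
      ((PySem.Dict.ofList pr.2).getD "program_tags" []).foldl (fun d tag =>
        let nm := pvTagName tag
        d.insert nm (PySem.Set.add (d.getD nm PySem.Set.empty) pr.1)) d)
      PySem.Dict.empty
  name_to_programs.items.foldl
    (fun s p => if PySem.Set.len p.2 > 1 then PySem.Set.add s p.1 else s)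
    PySem.Set.empty

-- ===== PORT B =====
def collect_collision_names_py_alt (program_payloads : List (String × List (String × List (List (String × String))))) : List String :=
  let tag_names : List (List String) := program_payloads.map (fun pr => pvNamesOf pr.2)
  let seen : List String :=
    tag_names.foldl (fun s names => names.foldl (fun s n => if n ∈ s then s else s ++ [n]) s) []
  seen.foldl
    (fun out n => if tag_names.countP (fun names => decide (n ∈ names)) > 1 then PySem.Set.add out n else out)
    PySem.Set.empty

-- ===== PRECONDITION & SPEC =====
-- Pre_ requires (a) pairwise-distinct program names: a Python dict argument cannot carry duplicate
-- keys, so association lists with duplicates encode no Python input; and (b) every tag dict under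
-- "program_tags" has a "name" key: on a missing key A raises KeyError (returns nothing).
def Pre_collect_collision_names_py (program_payloads : List (String × List (String × List (List (String × String))))) : Prop :=
  (program_payloads.map Prod.fst).Nodup ∧
  ∀ pr ∈ program_payloads, ∀ tag ∈ (PySem.Dict.ofList pr.2).getD "program_tags" [],
    "name" ∈ tag.map Prod.fst
instance (program_payloads : List (String × List (String × List (List (String × String))))) : Decidable (Pre_collect_collision_names_py program_payloads) := by unfold Pre_collect_collision_names_py; infer_instance

def pvWitness_collect_collision_names_py : (List (String × List (String × List (List (String × String))))) :=
  [("p1", [("program_tags", [[("name", "t")], [("name", "u")]])]),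
   ("p2", [("program_tags", [[("name", "t")]])])]

def Spec_collect_collision_names_py (program_payloads : List (String × List (String × List (List (String × String))))) (out : List String) : Prop := out = collect_collision_names_py_alt program_payloads
instance (program_payloads : List (String × List (String × List (List (String × String))))) (out : List String) : Decidable (Spec_collect_collision_names_py program_payloads out) := by unfold Spec_collect_collision_names_py; infer_instance

-- ===== CLAIM (what is proved, stated in full; the proofs are below) =====
def Claim_equal_collect_collision_names_py : Prop := ∀ (program_payloads : List (String × List (String × List (List (String × String))))), Dom_collect_collision_names_py program_payloads → Pre_collect_collision_names_py program_payloads → Spec_collect_collision_names_py program_payloads (collect_collision_names_py program_payloads)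

-- ===== LEMMAS AND PROOFS =====

-- membership in B's ordered-dedup loop
theorem pv_seen_mem (ns : List String) :
    ∀ (s : List String) (x : String),
      x ∈ ns.foldl (fun s n => if n ∈ s then s else s ++ [n]) s ↔ x ∈ s ∨ x ∈ ns := by
  induction ns with
  | nil => simp
  | cons m ns ih =>
    intro s x
    by_cases hm : m ∈ s <;> simp [hm, ih] <;> constructor <;> intro h
    · tauto
    · rcases h with h | h | h
      · tauto
      · exact Or.inl (h ▸ hm)
      · tauto
    · tauto
    · tauto

-- B's ordered-dedup loop keeps the accumulator duplicate-free
theorem pv_seen_nodup (ns : List String) :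
    ∀ (s : List String), s.Nodup →
      (ns.foldl (fun s n => if n ∈ s then s else s ++ [n]) s).Nodup := by
  induction ns with
  | nil => intro s h; simpa using h
  | cons m ns ih =>
    intro s h
    by_cases hm : m ∈ s
    · simpa [hm] using ih s h
    · simpa [hm] using ih (s ++ [m]) (by simp [List.Nodup.append, h, hm])

-- one program's inner loop: A's dict after tags of one program vs. the dedup list
theorem pv_inner (ns : List String) (q : String) :
    ∀ (d : PySem.Dict String (PySem.Set String)) (s : List String) (g : String → List String),
      d.items = s.map (fun n => (n, g n)) → s.Nodup → (∀ n, n ∉ s → g n = []) →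
      (ns.foldl (fun d n => d.insert n (PySem.Set.add (d.getD n PySem.Set.empty) q)) d).items
        = (ns.foldl (fun s n => if n ∈ s then s else s ++ [n]) s).map
            (fun n => (n, if n ∈ ns then PySem.Set.add (g n) q else g n)) := by
  induction ns with
  | nil => intro d s g hd _ _; simpa using hd
  | cons m ns ih =>
    intro d s g hd hs hfresh
    have hkeys : d.keys = s := by
      simp [PySem.Dict.keys, hd, Function.comp_def]
    have hpt : (fun n => (n, if n ∈ ns then PySem.Set.add (if n = m then PySem.Set.add (g n) q else g n) q
                              else if n = m then PySem.Set.add (g n) q else g n))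
        = (fun n => (n, if n ∈ m :: ns then PySem.Set.add (g n) q else g n)) := by
      funext n
      by_cases h : n = m
      · subst h
        by_cases hmm : n ∈ ns <;> simp [hmm]
      · simp [h]
    by_cases hm : m ∈ s
    · -- m is already a key of the dict; the seen list does not change
      have hcont : d.contains m = true := by
        rw [PySem.Dict.contains_eq_decide_mem_keys, hkeys]; simp [hm]
      have hget : ∀ d0, d.getD m d0 = g m :=
        PySem.Dict.getD_of_mem_items d (by rw [hd]; exact List.mem_map_of_mem hm)
          (by rw [hkeys]; exact hs)
      have hstep : (d.insert m (PySem.Set.add (d.getD m PySem.Set.empty) q)).items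
          = s.map (fun n => (n, if n = m then PySem.Set.add (g n) q else g n)) := by
        rw [PySem.Dict.items_insert_of_contains _ _ hcont, hd, List.map_map]
        refine List.map_congr_left (fun n hn => ?_)
        by_cases h : n = m
        · subst h; simp [hget]
        · simp [Function.comp, h]
      have hih := ih _ s _ hstep hs (fun n hn => by
        have : n ≠ m := fun h => hn (h ▸ hm)
        simp [this, hfresh n hn])
      simp only [List.foldl_cons, hm, if_pos] at hih ⊢
      rw [hih, hpt]
    · -- m is a fresh key: it is appended to the dict and to seen
      have hcont : d.contains m = false := by
        rw [PySem.Dict.contains_eq_decide_mem_keys, hkeys]; simp [hm]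
      have hget : ∀ d0 : PySem.Set String, d.getD m d0 = d0 :=
        fun d0 => PySem.Dict.getD_of_not_contains d d0 hcont
      have hstep : (d.insert m (PySem.Set.add (d.getD m PySem.Set.empty) q)).items
          = (s ++ [m]).map (fun n => (n, if n = m then PySem.Set.add (g n) q else g n)) := by
        rw [PySem.Dict.items_insert_of_not_contains _ _ hcont, hd, List.map_append]
        have h1 : s.map (fun n => (n, g n))
            = s.map (fun n => (n, if n = m then PySem.Set.add (g n) q else g n)) := by
          refine List.map_congr_left (fun n hn => ?_)
          have : n ≠ m := fun h => hm (h ▸ hn)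
          simp [this]
        rw [h1]
        simp [hget, hfresh m hm]
      have hih := ih _ (s ++ [m]) _ hstep (by simp [List.Nodup.append, hs, hm])
        (fun n hn => by
          have h1 : n ≠ m := by simp at hn; tauto
          have h2 : n ∉ s := by simp at hn; tauto
          simp [h1, hfresh n h2])
      simp only [List.foldl_cons, hm, if_neg, not_false_iff] at hih ⊢
      rw [hih, hpt]

-- the whole outer loop: A's dict vs. (seen, per-name program list)
theorem pv_outer (P : List (String × List String)) :
    ∀ (d : PySem.Dict String (PySem.Set String)) (s : List String) (g : String → List String),
      d.items = s.map (fun n => (n, g n)) → s.Nodup → (∀ n, n ∉ s → g n = []) →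
      (∀ pr ∈ P, ∀ n, pr.1 ∉ g n) → (P.map Prod.fst).Nodup →
      (P.foldl (fun d pr => pr.2.foldl (fun d n => d.insert n (PySem.Set.add (d.getD n PySem.Set.empty) pr.1)) d) d).items
        = (P.foldl (fun s pr => pr.2.foldl (fun s n => if n ∈ s then s else s ++ [n]) s) s).map
            (fun n => (n, g n ++ (P.filter (fun pr => decide (n ∈ pr.2))).map Prod.fst)) := by
  induction P with
  | nil =>
    intro d s g hd _ _ _ _
    simpa using hd
  | cons pr P ih =>
    intro d s g hd hs hfresh hnew hP
    obtain ⟨q, ns⟩ := pr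
    have hq : ∀ n, q ∉ g n := fun n => hnew (q, ns) (by simp) n
    -- one program via pv_inner, with Set.add unfolded to an append (q is new everywhere)
    have hinner := pv_inner ns q d s g hd hs hfresh
    have hg1 : (fun n => (n, if n ∈ ns then PySem.Set.add (g n) q else g n))
        = (fun n => (n, if n ∈ ns then g n ++ [q] else g n)) := by
      funext n
      by_cases h : n ∈ ns <;> simp [h, PySem.Set.add_of_not_mem (hq n)]
    rw [hg1] at hinner
    have hs1 : (ns.foldl (fun s n => if n ∈ s then s else s ++ [n]) s).Nodup :=
      pv_seen_nodup ns s hs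
    have hih := ih _ _ (fun n => if n ∈ ns then g n ++ [q] else g n) hinner hs1
      (fun n hn => by
        have h1 : n ∉ ns := fun h => hn ((pv_seen_mem ns s n).2 (Or.inr h))
        have h2 : n ∉ s := fun h => hn ((pv_seen_mem ns s n).2 (Or.inl h))
        simp [h1, hfresh n h2])
      (fun pr' hpr' n => by
        have hne : pr'.1 ≠ q := by
          intro h
          have hmem : q ∈ P.map Prod.fst := h ▸ List.mem_map_of_mem hpr'
          exact (List.nodup_cons.mp (by simpa using hP)).1 hmem
        have := hnew pr' (by simp [hpr']) n
        by_cases hn : n ∈ ns <;> simp [hn, this, hne])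
      ((List.nodup_cons.mp (by simpa using hP)).2)
    simp only [List.foldl_cons] at hih ⊢
    rw [hih]
    refine List.map_congr_left (fun n _ => ?_)
    by_cases h : n ∈ ns <;> simp [h]

-- A's whole computation, after pushing the name extraction through the folds, over P := [(program, its name list)]
theorem pv_main (pp : List (String × List (String × List (List (String × String)))))
    (hnodup : (pp.map Prod.fst).Nodup) :
    collect_collision_names_py pp = collect_collision_names_py_alt pp := by
  have hitems_empty : (PySem.Dict.empty : PySem.Dict String (PySem.Set String)).items = [] := rfl
  have houter := pv_outer (pp.map (fun pr => (pr.1, pvNamesOf pr.2)))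
    PySem.Dict.empty [] (fun _ => []) (by simp [hitems_empty]) List.nodup_nil
    (fun _ _ => rfl) (fun _ _ _ => by simp)
    (by rw [List.map_map]; simpa [Function.comp_def] using hnodup)
  simp only [List.foldl_map] at houter
  simp only [collect_collision_names_py, collect_collision_names_py_alt, pvNamesOf,
    List.foldl_map] at houter ⊢
  rw [houter, List.foldl_map]
  refine PySem.List.foldl_congr_mem _ _ _ _ (fun acc n _ => ?_)
  have hc : ((((pp.map (fun pr => (pr.1, pvNamesOf pr.2))).filter
        (fun pr => decide (n ∈ pr.2))).map Prod.fst).length)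
      = (pp.map (fun pr => pvNamesOf pr.2)).countP (fun names => decide (n ∈ names)) := by
    rw [List.length_map, ← List.countP_eq_length_filter, List.countP_map, List.countP_map]
    simp [Function.comp_def]
  simp only [pvNamesOf] at hc
  simp only [List.nil_append, PySem.Set.len, hc]
  split_ifs with h1 h2 <;> first | rfl | (exfalso; omega)

-- ===== VERDICT (by name: the statement is the Claim_ definition above) =====
theorem collect_collision_names_py_spec : Claim_equal_collect_collision_names_py := by
  intro pp _ hpre
  unfold Spec_collect_collision_names_py
  exact pv_main pp hpre.1
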